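-- pv_equiv track=rewrite | github.com/costas-basdekis/advent-of-code-submissions | year_2018/day_02/part_a.py | get_two_and_three_letter_instances_counts
-- ===== SOURCE A (Python) =====
-- import itertools
--
-- def get_two_and_three_letter_instances_counts(box_ids):
--     """
--     >>> get_two_and_three_letter_instances_counts(["abcdef"])
--     (0, 0)
--     >>> get_two_and_three_letter_instances_counts(["bababc"])
--     (1, 1)
--     >>> get_two_and_three_letter_instances_counts(["abbcde"])
--     (1, 0)
--     >>> get_two_and_three_letter_instances_counts(["abcccd"])
--     (0, 1)
--     >>> get_two_and_three_letter_instances_counts([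
--     ...     "abcdef",
--     ...     "bababc",
--     ...     "abbcde",
--     ...     "abcccd",
--     ...     "aabcdd",
--     ...     "abcdee",
--     ...     "ababab",
--     ... ])
--     (4, 3)
--     """
--     count_2, count_3 = 0, 0
--     for box_id in box_ids:
--         has_2, has_3 = get_two_and_three_letter_instances_presence(box_id)
--         if has_2:
--             count_2 += 1
--         if has_3:
--             count_3 += 1
--
--     return count_2, count_3
--
-- def get_two_and_three_letter_instances_presence(box_id):
--     """
--     >>> get_two_and_three_letter_instances_presence("abcdef")
--     (False, False)
--     >>> get_two_and_three_letter_instances_presence("bababc")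
--     (True, True)
--     >>> get_two_and_three_letter_instances_presence("abbcde")
--     (True, False)
--     >>> get_two_and_three_letter_instances_presence("abcccd")
--     (False, True)
--     >>> get_two_and_three_letter_instances_presence("aabcdd")
--     (True, False)
--     >>> get_two_and_three_letter_instances_presence("abcdee")
--     (True, False)
--     >>> get_two_and_three_letter_instances_presence("ababab")
--     (False, True)
--     """
--     counts_present = {
--         count
--         for count in (
--             len(tuple(letters))
--             for _, letters in itertools.groupby(sorted(box_id))
--         )
--         if count in (2, 3)
--     }
--
--     return 2 in counts_present, 3 in counts_present
-- ===== SOURCE B (Python) =====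
-- def get_two_and_three_letter_instances_counts(box_ids):
--     count_2, count_3 = 0, 0
--     for box_id in box_ids:
--         counts = {}
--         for letter in box_id:
--             counts[letter] = counts.get(letter, 0) + 1
--         values = counts.values()
--         if 2 in values:
--             count_2 += 1
--         if 3 in values:
--             count_3 += 1
--     return count_2, count_3
-- ===== Notes on version B (the rewrite author's own statement) =====
-- stated objective: faster
-- what changed: The per-id presence test no longer sorts the id and measures the lengths of consecutive groups (itertools.groupby over sorted(box_id)); B builds a letter-frequency dictionary in one left-to-right pass and checks whether 2 or 3 occurs among its values.
import Mathlib
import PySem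

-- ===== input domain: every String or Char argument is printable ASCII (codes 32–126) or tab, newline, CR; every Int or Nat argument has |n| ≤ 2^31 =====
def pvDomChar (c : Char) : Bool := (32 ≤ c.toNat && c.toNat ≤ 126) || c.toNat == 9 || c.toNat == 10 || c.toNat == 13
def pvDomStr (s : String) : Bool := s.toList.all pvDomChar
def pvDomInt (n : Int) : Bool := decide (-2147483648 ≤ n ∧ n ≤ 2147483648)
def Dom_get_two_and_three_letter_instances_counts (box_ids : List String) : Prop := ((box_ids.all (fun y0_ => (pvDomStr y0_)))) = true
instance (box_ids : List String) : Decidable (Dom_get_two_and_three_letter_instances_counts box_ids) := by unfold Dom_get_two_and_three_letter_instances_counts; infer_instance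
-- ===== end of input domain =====

-- B replaces A's sort-then-group-lengths presence test by a single-pass letter-frequency
-- dictionary whose values are checked for 2 and 3 (measured faster: no per-id sort); same results.

-- ===== PORT A =====
-- itertools.groupby over a (sorted) char list: the (key, length-of-group) runs of equal
-- consecutive characters (exact: on a sorted list these are exactly groupby's groups).
def pvRuns : List Char → List (Char × Nat)
  | [] => []
  | c :: rest =>
    match pvRuns rest with
    | [] => [(c, 1)]
    | (d, n) :: tail => if c = d then (c, n + 1) :: tail else (c, 1) :: (d, n) :: tail

def get_two_and_three_letter_instances_presence (box_id : String) : Bool × Bool :=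
  let counts_present : PySem.Set Nat :=
    PySem.Set.ofList
      (((pvRuns (PySem.List.sorted box_id.toList (fun c => c))).map Prod.snd).filter
        (fun count => count == 2 || count == 3))
  (PySem.Set.contains counts_present 2, PySem.Set.contains counts_present 3)

def get_two_and_three_letter_instances_counts (box_ids : List String) : Int × Int :=
  box_ids.foldl
    (fun (acc : Int × Int) box_id =>
      let p := get_two_and_three_letter_instances_presence box_id
      let acc2 := if p.1 then (acc.1 + 1, acc.2) else acc
      if p.2 then (acc2.1, acc2.2 + 1) else acc2)
    (0, 0)

-- ===== PORT B =====
def get_two_and_three_letter_instances_counts_alt (box_ids : List String) : Int × Int :=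
  box_ids.foldl
    (fun (acc : Int × Int) box_id =>
      let counts : PySem.Dict Char Int :=
        box_id.toList.foldl (fun d x => d.insert x (d.getD x 0 + 1)) PySem.Dict.empty
      let values := counts.values
      let acc2 := if values.contains 2 then (acc.1 + 1, acc.2) else acc
      if values.contains 3 then (acc2.1, acc2.2 + 1) else acc2)
    (0, 0)

-- ===== PRECONDITION & SPEC =====
def Spec_get_two_and_three_letter_instances_counts (box_ids : List String) (out : Int × Int) : Prop := out = get_two_and_three_letter_instances_counts_alt box_ids
instance (box_ids : List String) (out : Int × Int) : Decidable (Spec_get_two_and_three_letter_instances_counts box_ids out) := by unfold Spec_get_two_and_three_letter_instances_counts; infer_instance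

-- ===== CLAIM (what is proved, stated in full; the proofs are below) =====
def Claim_equal_get_two_and_three_letter_instances_counts : Prop := ∀ (box_ids : List String), Dom_get_two_and_three_letter_instances_counts box_ids → Spec_get_two_and_three_letter_instances_counts box_ids (get_two_and_three_letter_instances_counts box_ids)

-- ===== LEMMAS AND PROOFS =====

-- Invariant of pvRuns on a sorted list: each run (c, n) records a character of the list
-- together with its full multiplicity, run keys are distinct and exhaustive, and the
-- first run key is the head of the list.
theorem pvRuns_invariant : ∀ (sl : List Char), sl.Pairwise (· ≤ ·) →
    (∀ p ∈ pvRuns sl, p.1 ∈ sl ∧ p.2 = sl.count p.1) ∧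
    ((pvRuns sl).map Prod.fst).Nodup ∧
    (∀ c ∈ sl, c ∈ (pvRuns sl).map Prod.fst) ∧
    (∀ d n tail, pvRuns sl = (d, n) :: tail → sl.head? = some d) := by
  intro sl hp
  induction sl with
  | nil => simp [pvRuns]
  | cons a t ih =>
    obtain ⟨rel, hpt⟩ := List.pairwise_cons.mp hp
    obtain ⟨ha, hb, hc, hhd⟩ := ih hpt
    cases hr : pvRuns t with
    | nil =>
      have ht : t = [] := by
        cases t with
        | nil => rfl
        | cons x xs => exact absurd (hc x (List.mem_cons_self)) (by simp [hr])
      subst ht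
      refine ⟨by simp [pvRuns], by simp [pvRuns], by simp [pvRuns], ?_⟩
      intro d n tl heq
      simp [pvRuns] at heq
      simp [heq.1.1]
    | cons p tail =>
      obtain ⟨d, n⟩ := p
      obtain ⟨t'', ht⟩ : ∃ t'', t = d :: t'' := by
        have h := hhd d n tail hr
        cases t with
        | nil => simp at h
        | cons x xs =>
          simp at h
          exact ⟨xs, by rw [h]⟩
      by_cases had : a = d
      · -- a merges into the first run
        have hruns : pvRuns (a :: t) = (a, n + 1) :: tail := by
          simp [pvRuns, hr, had]
        have hdn : (d, n) ∈ pvRuns t := by rw [hr]; exact List.mem_cons_self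
        have hncount : n = t.count d := (ha _ hdn).2
        have htailne : ∀ p' ∈ tail, p'.1 ≠ d := by
          intro p' hp' heq
          have hnd : (List.map Prod.fst (pvRuns t)).Nodup := hb
          rw [hr] at hnd
          simp only [List.map_cons, List.nodup_cons] at hnd
          exact hnd.1 (heq ▸ List.mem_map_of_mem hp')
        refine ⟨?_, ?_, ?_, ?_⟩
        · intro p' hp'
          rw [hruns] at hp'
          rcases List.mem_cons.mp hp' with h | h
          · subst h
            constructor
            · exact List.mem_cons_self
            · simp [had, hncount]
          · have h1 := ha p' (by rw [hr]; exact List.mem_cons_of_mem _ h)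
            have hne : p'.1 ≠ a := by rw [had]; exact htailne p' h
            refine ⟨List.mem_cons_of_mem _ h1.1, ?_⟩
            simp [h1.2, Ne.symm hne]
        · rw [hruns]
          have : (List.map Prod.fst (pvRuns t)).Nodup := hb
          rw [hr] at this
          simpa [had] using this
        · intro c hcm
          rcases List.mem_cons.mp hcm with h | h
          · subst h; rw [hruns]; simp
          · have := hc c h
            rw [hr] at this
            rw [hruns]
            simpa [had] using this
        · intro d' n' tail' heq
          rw [hruns] at heq
          simp at heq
          simp [heq.1.1]
      · -- a starts a new run
        have hruns : pvRuns (a :: t) = (a, 1) :: (d, n) :: tail := by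
          simp [pvRuns, hr, had]
        have hanott : a ∉ t := by
          intro hat
          rw [ht] at hat
          rcases List.mem_cons.mp hat with h | h
          · exact had h
          · have h1 : d ≤ a := by
              have := List.pairwise_cons.mp (ht ▸ hpt)
              exact this.1 a h
            have h2 : a ≤ d := rel d (ht ▸ List.mem_cons_self)
            exact had (le_antisymm h2 h1)
        refine ⟨?_, ?_, ?_, ?_⟩
        · intro p' hp'
          rw [hruns] at hp'
          rcases List.mem_cons.mp hp' with h | h
          · subst h
            refine ⟨List.mem_cons_self, ?_⟩
            simp [List.count_eq_zero.mpr hanott]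
          · have h1 := ha p' (by rw [hr]; exact h)
            have hne : p'.1 ≠ a := fun he => hanott (he ▸ h1.1)
            refine ⟨List.mem_cons_of_mem _ h1.1, ?_⟩
            simp [h1.2, Ne.symm hne]
        · have hnd : (List.map Prod.fst (pvRuns t)).Nodup := hb
          rw [hr] at hnd
          rw [hruns]
          simp only [List.map_cons, List.nodup_cons] at hnd ⊢
          refine ⟨?_, hnd⟩
          intro hmem
          rcases List.mem_cons.mp hmem with h | h
          · exact had h
          · obtain ⟨p', hp', hpe⟩ := List.mem_map.mp h
            exact hanott (hpe ▸ (ha p' (by rw [hr]; exact List.mem_cons_of_mem _ hp')).1)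
        · intro c hcm
          rcases List.mem_cons.mp hcm with h | h
          · subst h; rw [hruns]; simp
          · have := hc c h
            rw [hr] at this
            rw [hruns]
            simp at this ⊢
            tauto
        · intro d' n' tail' heq
          rw [hruns] at heq
          simp at heq
          simp [heq.1.1]

-- k is a run length of the sorted id  ↔  some character occurs exactly k times.
theorem runs_snd_mem (l : List Char) (k : Nat) :
    (k ∈ (pvRuns (PySem.List.sorted l (fun c => c))).map Prod.snd) ↔
      ∃ c, c ∈ l ∧ l.count c = k := by
  have hperm : (PySem.List.sorted l (fun c => c)).Perm l :=
    PySem.List.sorted_perm l (fun c => c) false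
  obtain ⟨ha, _, hc, _⟩ :=
    pvRuns_invariant (PySem.List.sorted l (fun c => c)) (PySem.List.sorted_pairwise l (fun c => c))
  constructor
  · intro hk
    obtain ⟨p, hmem, hpe⟩ := List.mem_map.mp hk
    obtain ⟨h1, h2⟩ := ha p hmem
    exact ⟨p.1, hperm.mem_iff.mp h1, by rw [← hperm.count_eq, ← h2, hpe]⟩
  · rintro ⟨c, hcl, hcount⟩
    have hcsl : c ∈ PySem.List.sorted l (fun c => c) := hperm.mem_iff.mpr hcl
    obtain ⟨p, hmem, hpe⟩ := List.mem_map.mp (hc c hcsl)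
    refine List.mem_map.mpr ⟨p, hmem, ?_⟩
    rw [(ha p hmem).2, hpe, hperm.count_eq, hcount]

-- k (= 2 or 3) is among the frequency dictionary's values ↔ some character occurs exactly k times.
theorem dict_values_contains (l : List Char) (k : Nat) :
    ((l.foldl (fun d x => d.insert x (d.getD x 0 + 1)) PySem.Dict.empty).values.contains
        ((k : Int))) = true ↔ ∃ c, c ∈ l ∧ l.count c = k := by
  rw [PySem.Dict.foldl_insert_getD_add_one_eq_counter]
  simp only [PySem.Dict.values, PySem.Dict.items_counter]
  simp [List.mem_map, PySem.Set.mem_ofList]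

-- The per-id presence pair of A equals B's two value-membership tests.
theorem presence_eq (s : String) :
    get_two_and_three_letter_instances_presence s =
      ((s.toList.foldl (fun d x => d.insert x (d.getD x 0 + 1))
          (PySem.Dict.empty : PySem.Dict Char Int)).values.contains 2,
       (s.toList.foldl (fun d x => d.insert x (d.getD x 0 + 1))
          (PySem.Dict.empty : PySem.Dict Char Int)).values.contains 3) := by
  unfold get_two_and_three_letter_instances_presence
  have h2 := dict_values_contains s.toList 2
  have h3 := dict_values_contains s.toList 3
  rw [show ((2 : Nat) : Int) = 2 by norm_num] at h2
  rw [show ((3 : Nat) : Int) = 3 by norm_num] at h3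
  refine Prod.ext ?_ ?_
  · dsimp only
    apply Bool.eq_iff_iff.mpr
    rw [h2, ← runs_snd_mem s.toList 2]
    simp only [PySem.Set.contains_iff, PySem.Set.mem_ofList, List.mem_filter]
    simp
  · dsimp only
    apply Bool.eq_iff_iff.mpr
    rw [h3, ← runs_snd_mem s.toList 3]
    simp only [PySem.Set.contains_iff, PySem.Set.mem_ofList, List.mem_filter]
    simp

-- ===== VERDICT (by name: the statement is the Claim_ definition above) =====
theorem get_two_and_three_letter_instances_counts_spec : Claim_equal_get_two_and_three_letter_instances_counts := by
  intro box_ids _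
  unfold Spec_get_two_and_three_letter_instances_counts
  unfold get_two_and_three_letter_instances_counts get_two_and_three_letter_instances_counts_alt
  congr 1
  funext acc s
  simp only [presence_eq]
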